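-- pv_equiv track=rewrite | github.com/minseojeong1012/codetree-TILs | 240129/2개 이상의 알파벳/more-than-one-alphabet.py | f
-- ===== SOURCE A (Python) =====
-- def f(a):
--     for i in range(1, len(a)):
--         if a[i] != a[0]:
--             for i in range(len(a)):
--                 for j in range(i + 1, len(a)):
--                     if a[i] == a[j]:
--                         return True
--     return False
-- ===== SOURCE B (Python) =====
-- def f(a):
--     s = sorted(a)
--     if len(s) < 2:
--         return False
--     return s[0] != s[-1] and any(s[i] == s[i + 1] for i in range(len(s) - 1))
-- ===== Notes on version B (the rewrite author's own statement) =====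
-- stated objective: alternative
-- what changed: A's trigger scan plus nested quadratic pairwise duplicate search is replaced by a single sort, after which having two distinct characters is a first-vs-last comparison and having a duplicate is one adjacent-equal scan.
import Mathlib
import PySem

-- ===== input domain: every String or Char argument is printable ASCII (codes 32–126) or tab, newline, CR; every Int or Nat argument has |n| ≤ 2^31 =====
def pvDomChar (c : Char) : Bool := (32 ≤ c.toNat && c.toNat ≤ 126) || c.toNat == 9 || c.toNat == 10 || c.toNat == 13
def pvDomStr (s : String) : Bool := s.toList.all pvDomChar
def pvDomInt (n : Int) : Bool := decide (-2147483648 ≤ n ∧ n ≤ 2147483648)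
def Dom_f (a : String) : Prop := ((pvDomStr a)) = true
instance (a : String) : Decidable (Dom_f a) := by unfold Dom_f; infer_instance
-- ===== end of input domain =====

-- B replaces A's nested pairwise duplicate scan by a sort followed by one adjacent-pair scan (objective: alternative).

-- ===== PORT A =====
def f (a : String) : Bool :=
  let l := a.toList
  let n : Int := (PySem.Str.len a : Int)
  (PySem.List.pyRange 1 n 1).any (fun i =>
    if PySem.List.pyGetD l i ' ' ≠ PySem.List.pyGetD l 0 ' ' then
      (PySem.List.pyRange 0 n 1).any (fun i =>
        (PySem.List.pyRange (i + 1) n 1).any (fun j =>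
          PySem.List.pyGetD l i ' ' == PySem.List.pyGetD l j ' '))
    else false)

-- ===== PORT B =====
def f_alt (a : String) : Bool :=
  let s := PySem.List.sorted a.toList (fun c => c) false
  if s.length < 2 then false
  else
    (PySem.List.pyGetD s 0 ' ' ≠ PySem.List.pyGetD s (-1) ' ') &&
    (PySem.List.pyRange 0 ((s.length : Int) - 1) 1).any (fun i =>
      PySem.List.pyGetD s i ' ' == PySem.List.pyGetD s (i + 1) ' ')

-- ===== PRECONDITION & SPEC =====
def Spec_f (a : String) (out : Bool) : Prop := out = f_alt a
instance (a : String) (out : Bool) : Decidable (Spec_f a out) := by unfold Spec_f; infer_instance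

-- ===== CLAIM (what is proved, stated in full; the proofs are below) =====
def Claim_equal_f : Prop := ∀ (a : String), Dom_f a → Spec_f a (f a)

-- ===== LEMMAS AND PROOFS =====

-- 'if cond then b else false' inside an any, with b independent of the element.
lemma any_if_const {α : Type} (l : List α) (p : α → Prop) [DecidablePred p] (b : Bool) :
    (l.any (fun x => if p x then b else false)) = (l.any (fun x => decide (p x)) && b) := by
  cases b <;> simp

lemma headD_eq (l : List Char) (h : l ≠ []) : l.headD ' ' = l[0]'(List.length_pos_iff.mpr h) := by
  cases l with
  | nil => exact absurd rfl h
  | cons x t => rfl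

-- '∃ an element different from some member c' does not depend on which member c is.
lemma exists_ne_anchor {l : List Char} {c d : Char} (hc : c ∈ l) (hd : d ∈ l) :
    (∃ x ∈ l, x ≠ c) ↔ (∃ x ∈ l, x ≠ d) := by
  constructor <;> rintro ⟨x, hx, hne⟩
  · by_cases h : x = d
    · exact ⟨c, hc, fun hcd => hne (h.trans hcd.symm)⟩
    · exact ⟨x, hx, h⟩
  · by_cases h : x = c
    · exact ⟨d, hd, fun hdc => hne (h.trans hdc.symm)⟩
    · exact ⟨x, hx, h⟩

-- ¬ Nodup as a pair of equal positions.
lemma not_nodup_iff_pair (l : List Char) :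
    ¬ l.Nodup ↔ ∃ i j, ∃ h : i < j, ∃ hj : j < l.length,
      l[i]'(Nat.lt_trans h hj) = l[j] := by
  rw [List.nodup_iff_injective_getElem]
  constructor
  · intro h
    simp only [Function.Injective] at h
    push Not at h
    obtain ⟨⟨i, hi⟩, ⟨j, hj⟩, heq, hne⟩ := h
    rcases Nat.lt_or_ge i j with hij | hij
    · exact ⟨i, j, hij, hj, heq⟩
    · rcases Nat.lt_or_ge j i with hji | hji
      · exact ⟨j, i, hji, hi, heq.symm⟩
      · exact absurd (Fin.ext (Nat.le_antisymm hji hij)) hne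
  · rintro ⟨i, j, h, hj, heq⟩ hinj
    have := hinj (a₁ := ⟨i, Nat.lt_trans h hj⟩) (a₂ := ⟨j, hj⟩) heq
    exact absurd (Fin.mk.injEq .. ▸ this) (Nat.ne_of_lt h)

lemma nodup_short (l : List Char) (h : l.length < 2) : l.Nodup := by
  match l with
  | [] => simp
  | [x] => simp
  | x :: y :: t => simp at h

-- A's inner double loop finds a duplicate pair iff the list is not Nodup.
lemma dup_iff (l : List Char) :
    ((PySem.List.pyRange 0 (l.length : Int) 1).any (fun i =>
        (PySem.List.pyRange (i + 1) (l.length : Int) 1).any (fun j =>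
          PySem.List.pyGetD l i ' ' == PySem.List.pyGetD l j ' '))) = true ↔ ¬ l.Nodup := by
  rw [not_nodup_iff_pair]
  simp only [List.any_eq_true, PySem.List.mem_pyRange_one, beq_iff_eq]
  constructor
  · rintro ⟨i, ⟨h0, hin⟩, j, ⟨hij, hjn⟩, heq⟩
    rw [PySem.List.pyGetD_eq_getElem l ' ' h0 hin,
        PySem.List.pyGetD_eq_getElem l ' ' (by omega) hjn] at heq
    exact ⟨i.toNat, j.toNat, by omega, by omega, by convert heq using 2⟩
  · rintro ⟨i, j, hij, hjn, heq⟩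
    refine ⟨(i : Int), ⟨by omega, by omega⟩, (j : Int), ⟨by omega, by omega⟩, ?_⟩
    rw [PySem.List.pyGetD_eq_getElem l ' ' (by omega) (by omega),
        PySem.List.pyGetD_eq_getElem l ' ' (by omega) (by omega)]
    simpa using heq

-- A computes: (some char differs from the first) AND (some duplicate pair exists).
lemma f_iff (a : String) :
    f a = true ↔ (∃ x ∈ a.toList, x ≠ a.toList.headD ' ') ∧ ¬ a.toList.Nodup := by
  unfold f
  rw [PySem.Str.len_eq, any_if_const, Bool.and_eq_true, dup_iff]
  simp only [List.any_eq_true, PySem.List.mem_pyRange_one, decide_eq_true_iff]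
  constructor
  · rintro ⟨⟨i, ⟨h1, hin⟩, hne⟩, hd⟩
    have hnil : a.toList ≠ [] := by intro h; rw [h] at hin; simp at hin; omega
    refine ⟨⟨a.toList[i.toNat]'(by omega), List.getElem_mem _, ?_⟩, hd⟩
    rw [headD_eq _ hnil]
    rw [PySem.List.pyGetD_eq_getElem _ ' ' (by omega) hin,
        PySem.List.pyGetD_eq_getElem _ ' ' (by omega) (by omega)] at hne
    convert hne using 2
  · rintro ⟨⟨x, hx, hne⟩, hd⟩
    obtain ⟨k, hk, rfl⟩ := List.getElem_of_mem hx
    have hnil : a.toList ≠ [] := by intro h; simp [h] at hk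
    rw [headD_eq _ hnil] at hne
    have hk0 : k ≠ 0 := by intro h; subst h; exact hne rfl
    refine ⟨⟨(k : Int), ⟨by omega, by omega⟩, ?_⟩, hd⟩
    rw [PySem.List.pyGetD_eq_getElem _ ' ' (by omega) (by omega),
        PySem.List.pyGetD_eq_getElem _ ' ' (by omega) (by omega)]
    intro h
    apply hne
    convert h using 2

-- B computes the same two facts from the sorted list.
lemma f_alt_iff (a : String) :
    f_alt a = true ↔ (∃ x ∈ a.toList, x ≠ a.toList.headD ' ') ∧ ¬ a.toList.Nodup := by
  unfold f_alt
  set s := PySem.List.sorted a.toList (fun c => c) false with hs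
  have hlen : s.length = a.toList.length := PySem.List.length_sorted _ _ _
  by_cases hshort : s.length < 2
  · simp only [if_pos hshort]
    constructor
    · intro h; exact absurd h (by simp)
    · rintro ⟨_, hd⟩
      exact absurd (nodup_short _ (by omega)) hd
  · have h2 : 2 ≤ s.length := by omega
    have hnil : s ≠ [] := by intro h; rw [h] at h2; simp at h2
    have hlnil : a.toList ≠ [] := by intro h; rw [h] at hlen; simp at hlen; exact hnil hlen
    simp only [if_neg hshort, Bool.and_eq_true, decide_eq_true_iff, List.any_eq_true,
      PySem.List.mem_pyRange_one, beq_iff_eq]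
    rw [PySem.List.pyGetD_eq_getElem s ' ' (by omega) (by omega),
        PySem.List.pyGetD_neg_one s ' ' hnil]
    constructor
    · rintro ⟨hne, i, ⟨h0, hi⟩, heq⟩
      rw [PySem.List.pyGetD_eq_getElem s ' ' (by omega) (by omega),
          PySem.List.pyGetD_eq_getElem s ' ' (by omega) (by omega)] at heq
      constructor
      · have hmem : s.getLast hnil ∈ a.toList := by
          rw [← PySem.List.mem_sorted a.toList (fun c => c) false, ← hs]
          exact List.getLast_mem hnil
        have h0mem : s[0]'(by omega) ∈ a.toList := by
          rw [← PySem.List.mem_sorted a.toList (fun c => c) false, ← hs]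
          exact List.getElem_mem _
        have hhead : a.toList.headD ' ' ∈ a.toList := by
          rw [headD_eq _ hlnil]; exact List.getElem_mem _
        refine (exists_ne_anchor h0mem hhead).mp ⟨s.getLast hnil, hmem, fun h => hne h.symm⟩
      · rw [(PySem.List.sorted_perm a.toList (fun c => c) false).nodup_iff.symm, ← hs]
        rw [not_nodup_iff_pair]
        exact ⟨i.toNat, i.toNat + 1, by omega, by omega, by convert heq using 2; omega⟩
    · rintro ⟨⟨x, hx, hxne⟩, hd⟩
      rw [← (PySem.List.sorted_perm a.toList (fun c => c) false).nodup_iff, ← hs,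
          not_nodup_iff_pair] at hd
      obtain ⟨i, j, hij, hj, heq⟩ := hd
      have mono : ∀ p q : ℕ, (hpq : p ≤ q) → (hq : q < s.length) →
          s[p]'(by omega) ≤ s[q] := by
        intro p q hpq hq
        exact PySem.List.sorted_id_getElem_mono a.toList hpq (by rw [PySem.List.length_sorted]; omega)
      constructor
      · have hxs : x ∈ s := by rw [hs, PySem.List.mem_sorted]; exact hx
        obtain ⟨k, hk, rfl⟩ := List.getElem_of_mem hxs
        have hanchor : s[0]'(by omega) ∈ a.toList := by
          rw [← PySem.List.mem_sorted a.toList (fun c => c) false, ← hs]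
          exact List.getElem_mem _
        have hhead : a.toList.headD ' ' ∈ a.toList := by
          rw [headD_eq _ hlnil]; exact List.getElem_mem _
        have hxmem : s[k] ∈ a.toList := by
          rw [← PySem.List.mem_sorted a.toList (fun c => c) false, ← hs]
          exact List.getElem_mem _
        have hne0 : ∃ y ∈ a.toList, y ≠ s[0]'(by omega) :=
          (exists_ne_anchor hhead hanchor).mp ⟨s[k], hxmem, hxne⟩
        obtain ⟨y, hy, hyne⟩ := hne0
        intro hcontra
        apply hyne
        have hys : y ∈ s := by rw [hs, PySem.List.mem_sorted]; exact hy
        obtain ⟨m, hm, rfl⟩ := List.getElem_of_mem hys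
        have h1 : s[0]'(by omega) ≤ s[m] := mono 0 m (by omega) hm
        have h2' : s[m] ≤ s.getLast hnil := by
          rw [List.getLast_eq_getElem]
          exact mono m (s.length - 1) (by omega) (by omega)
        rw [← hcontra] at h2'
        exact le_antisymm h2' h1
      · have hi1 : i + 1 < s.length := by omega
        have hadj : s[i]'(by omega) = s[i+1] := by
          have h1 : s[i]'(by omega) ≤ s[i+1] := mono i (i+1) (by omega) hi1
          have h2' : s[i+1] ≤ s[j] := mono (i+1) j (by omega) hj
          rw [← heq] at h2'
          exact le_antisymm h1 h2'
        refine ⟨(i : Int), ⟨by omega, by omega⟩, ?_⟩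
        rw [PySem.List.pyGetD_eq_getElem s ' ' (by omega) (by omega),
            PySem.List.pyGetD_eq_getElem s ' ' (by omega) (by omega)]
        convert hadj using 2

-- ===== VERDICT (by name: the statement is the Claim_ definition above) =====
theorem f_spec : Claim_equal_f := by
  intro a _
  unfold Spec_f
  exact Bool.coe_iff_coe.mp ((f_iff a).trans (f_alt_iff a).symm)
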